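-- pv_equiv track=rewrite | github.com/HaoxuHuang/copa | constraint_solver/spatial_solver/parser.py | locate_constraints
-- ===== SOURCE A (Python) =====
-- def locate_constraints(lines):
--     """Locate the description of the constraints.
--     The description is wrapped in <Start Constraint>...<End Constraint>.
--     lines: a list of lines
--     """
--     for i, line in enumerate(lines):
--         line = line.strip()
--         if line == "<Start Constraint>":
--             start = i
--         elif line == "<End Constraint>":
--             end = i
--     return lines[start+1:end]
-- ===== SOURCE B (Python) =====
-- def locate_constraints(lines):
--     """Locate the description of the constraints.
--     The description is wrapped in <Start Constraint>...<End Constraint>.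
--     lines: a list of lines
--     """
--     rev = [line.strip() for line in lines][::-1]
--     n = len(lines)
--     start = n - 1 - rev.index("<Start Constraint>")
--     end = n - 1 - rev.index("<End Constraint>")
--     return lines[start + 1:end]
-- ===== Notes on version B (the rewrite author's own statement) =====
-- stated objective: alternative
-- what changed: Replaces A's single forward scan that keeps overwriting start/end state with two independent backward first-occurrence searches (strip all lines once, reverse, rev.index for each marker) and index arithmetic.
import Mathlib
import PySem

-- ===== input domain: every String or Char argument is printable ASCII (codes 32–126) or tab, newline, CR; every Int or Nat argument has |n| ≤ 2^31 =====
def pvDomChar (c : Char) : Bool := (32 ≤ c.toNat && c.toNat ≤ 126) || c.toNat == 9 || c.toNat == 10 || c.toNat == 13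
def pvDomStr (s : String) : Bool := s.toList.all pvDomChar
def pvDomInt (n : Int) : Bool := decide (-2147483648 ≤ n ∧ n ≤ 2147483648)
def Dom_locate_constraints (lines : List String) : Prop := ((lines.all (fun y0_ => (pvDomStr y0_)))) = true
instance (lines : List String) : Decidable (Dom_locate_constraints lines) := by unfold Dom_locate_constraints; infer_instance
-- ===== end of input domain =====

-- B replaces A's forward scan with overwritten state by two backward first-occurrence searches on the stripped, reversed list (alternative decomposition; same cost); return-value equivalence on inputs containing both markers.

-- ===== PORT A =====
-- the loop body of A: overwrite start on "<Start Constraint>", end on "<End Constraint>"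
def locStepA (s : Option Int × Option Int) (p : Int × String) : Option Int × Option Int :=
  let line := PySem.Str.strip p.2
  if line = "<Start Constraint>" then (some p.1, s.2)
  else if line = "<End Constraint>" then (s.1, some p.1)
  else s

def locate_constraints (lines : List String) : List String :=
  let st := (PySem.List.enumerate lines 0).foldl locStepA (none, none)
  match st with
  | (some start, some end_) => PySem.List.slice lines (some (start + 1)) (some end_)
  | _ => []  -- Python raises NameError here (a marker is missing); outside Pre_

-- ===== PORT B =====
def locate_constraints_alt (lines : List String) : List String :=
  let rev := (lines.map PySem.Str.strip).reverse
  let n : Int := lines.length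
  match PySem.List.index? rev "<Start Constraint>" with
  | none => []  -- Python raises ValueError here (start marker missing); outside Pre_
  | some i =>
      let start : Int := n - 1 - i
      match PySem.List.index? rev "<End Constraint>" with
      | none => []  -- Python raises ValueError here (end marker missing); outside Pre_
      | some j =>
          let end_ : Int := n - 1 - j
          PySem.List.slice lines (some (start + 1)) (some end_)

-- ===== PRECONDITION & SPEC =====
-- Pre_ excludes exactly the inputs where some marker never occurs (stripped): there A raises NameError and B raises ValueError.
def Pre_locate_constraints (lines : List String) : Prop :=
  "<Start Constraint>" ∈ lines.map PySem.Str.strip ∧ "<End Constraint>" ∈ lines.map PySem.Str.strip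
instance (lines : List String) : Decidable (Pre_locate_constraints lines) := by unfold Pre_locate_constraints; infer_instance

def pvWitness_locate_constraints : List String :=
  ["<Start Constraint>", "x", "<End Constraint>"]

def Spec_locate_constraints (lines : List String) (out : List String) : Prop := out = locate_constraints_alt lines
instance (lines : List String) (out : List String) : Decidable (Spec_locate_constraints lines out) := by unfold Spec_locate_constraints; infer_instance

-- ===== CLAIM (what is proved, stated in full; the proofs are below) =====
def Claim_equal_locate_constraints : Prop := ∀ (lines : List String), Dom_locate_constraints lines → Pre_locate_constraints lines → Spec_locate_constraints lines (locate_constraints lines)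

-- ===== LEMMAS AND PROOFS =====

-- index (from the left) of the LAST element whose strip equals the marker m
def lastMark (m : String) : List String → Option Nat
  | [] => none
  | x :: xs =>
      match lastMark m xs with
      | some i => some (i + 1)
      | none => if PySem.Str.strip x = m then some 0 else none

theorem lastMark_lt {m : String} : ∀ {xs : List String} {i : Nat},
    lastMark m xs = some i → i < xs.length := by
  intro xs
  induction xs with
  | nil => intro i h; simp [lastMark] at h
  | cons x xs ih =>
      intro i h
      simp only [lastMark] at h
      rcases hx : lastMark m xs with _ | j
      · rw [hx] at h
        by_cases hs : PySem.Str.strip x = m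
        · rw [if_pos hs] at h
          cases h
          simp
        · rw [if_neg hs] at h
          cases h
      · rw [hx] at h
        cases h
        have := ih hx
        simp only [List.length_cons]
        omega

theorem lastMark_eq_none_iff {m : String} : ∀ {xs : List String},
    lastMark m xs = none ↔ m ∉ xs.map PySem.Str.strip := by
  intro xs
  induction xs with
  | nil => simp [lastMark]
  | cons x xs ih =>
      simp only [lastMark, List.map_cons, List.mem_cons]
      rcases hx : lastMark m xs with _ | j
      · rw [hx] at ih
        have hnot : m ∉ List.map PySem.Str.strip xs := ih.mp rfl
        by_cases hs : PySem.Str.strip x = m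
        · rw [if_pos hs]
          constructor
          · intro h; cases h
          · intro h; exact absurd (Or.inl hs.symm) h
        · rw [if_neg hs]
          constructor
          · intro _
            rintro (hc | hc)
            · exact hs hc.symm
            · exact hnot hc
          · intro _; rfl
      · rw [hx] at ih
        constructor
        · intro h; cases h
        · intro h
          exact absurd (ih.mpr (fun hm => h (Or.inr hm))) (by simp)

-- locStepA leaves the respective component unchanged when the stripped line is not that marker
theorem pv_step_fst_of_ne (r : Option Int × Option Int) (p : Int × String)
    (hp : PySem.Str.strip p.2 ≠ "<Start Constraint>") : (locStepA r p).1 = r.1 := by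
  simp only [locStepA]
  by_cases h2 : PySem.Str.strip p.2 = "<End Constraint>" <;> simp [hp, h2]

theorem pv_step_snd_of_ne (r : Option Int × Option Int) (p : Int × String)
    (hp : PySem.Str.strip p.2 ≠ "<End Constraint>") : (locStepA r p).2 = r.2 := by
  simp only [locStepA]
  by_cases h1 : PySem.Str.strip p.2 = "<Start Constraint>" <;> simp [hp, h1]

-- A's fold: first component = index of the last stripped "<Start Constraint>" (offset by k), else initial
theorem pv_fold_fst : ∀ (xs : List String) (k : Int) (s : Option Int × Option Int),
    ((PySem.List.enumerate xs k).foldl locStepA s).1 =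
      match lastMark "<Start Constraint>" xs with
      | some i => some (k + i)
      | none => s.1 := by
  intro xs
  induction xs with
  | nil => intro k s; simp [PySem.List.enumerate_nil, lastMark]
  | cons x xs ih =>
      intro k s
      rw [PySem.List.enumerate_cons, List.foldl_cons, ih (k + 1) (locStepA s (k, x))]
      rcases h : lastMark "<Start Constraint>" xs with _ | i
      · simp only [lastMark, h]
        by_cases hx : PySem.Str.strip x = "<Start Constraint>"
        · simp [locStepA, hx]
        · rw [if_neg hx]
          exact pv_step_fst_of_ne s (k, x) hx
      · simp only [lastMark, h, Option.some_inj]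
        omega

-- A's fold: second component = index of the last stripped "<End Constraint>" (offset by k), else initial
theorem pv_fold_snd : ∀ (xs : List String) (k : Int) (s : Option Int × Option Int),
    ((PySem.List.enumerate xs k).foldl locStepA s).2 =
      match lastMark "<End Constraint>" xs with
      | some i => some (k + i)
      | none => s.2 := by
  intro xs
  induction xs with
  | nil => intro k s; simp [PySem.List.enumerate_nil, lastMark]
  | cons x xs ih =>
      intro k s
      rw [PySem.List.enumerate_cons, List.foldl_cons, ih (k + 1) (locStepA s (k, x))]
      rcases h : lastMark "<End Constraint>" xs with _ | i
      · simp only [lastMark, h]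
        by_cases hx : PySem.Str.strip x = "<End Constraint>"
        · simp [locStepA, hx]
        · rw [if_neg hx]
          exact pv_step_snd_of_ne s (k, x) hx
      · simp only [lastMark, h, Option.some_inj]
        omega

-- B's backward first-occurrence search = the same last-occurrence index, counted from the end
theorem pv_index_reverse (m : String) : ∀ (xs : List String),
    PySem.List.index? (xs.map PySem.Str.strip).reverse m =
      (lastMark m xs).map (fun i => xs.length - 1 - i) := by
  intro xs
  induction xs with
  | nil => simp [lastMark, PySem.List.index?]
  | cons x xs ih =>
      simp only [List.map_cons, List.reverse_cons, lastMark]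
      rcases h : lastMark m xs with _ | i
      · have hnot : m ∉ List.map PySem.Str.strip xs := lastMark_eq_none_iff.mp h
        have hnotr : m ∉ (List.map PySem.Str.strip xs).reverse := by simpa using hnot
        by_cases hx : PySem.Str.strip x = m
        · rw [hx, PySem.List.index?_append_singleton_self _ _ hnotr]
          simp
        · have hnone : m ∉ ((List.map PySem.Str.strip xs).reverse ++ [PySem.Str.strip x]) := by
            simp only [List.mem_append, List.mem_singleton]
            rintro (hc | hc)
            · exact hnotr hc
            · exact hx hc.symm
          rw [(PySem.List.index?_eq_none_iff _ _).mpr hnone]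
          simp [hx]
      · have hm : m ∈ (List.map PySem.Str.strip xs).reverse := by
          by_contra hc
          have : lastMark m xs = none := lastMark_eq_none_iff.mpr (by simpa using hc)
          rw [this] at h; cases h
        rw [PySem.List.index?_append_of_mem _ hm, ih, h]
        have hb : i < xs.length := lastMark_lt h
        simp only [Option.map_some, Option.some_inj, List.length_cons]
        omega

-- ===== VERDICT (by name: the statement is the Claim_ definition above) =====
theorem locate_constraints_spec : Claim_equal_locate_constraints := by
  intro lines _ hpre
  unfold Spec_locate_constraints locate_constraints locate_constraints_alt
  rcases hls : lastMark "<Start Constraint>" lines with _ | i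
  · exact absurd (lastMark_eq_none_iff.mp hls) (by simpa using hpre.1)
  rcases hle : lastMark "<End Constraint>" lines with _ | j
  · exact absurd (lastMark_eq_none_iff.mp hle) (by simpa using hpre.2)
  have hi : i < lines.length := lastMark_lt hls
  have hj : j < lines.length := lastMark_lt hle
  have h1 : ((PySem.List.enumerate lines 0).foldl locStepA (none, none)).1 = some (i : Int) := by
    rw [pv_fold_fst lines 0 (none, none), hls]
    simp
  have h2 : ((PySem.List.enumerate lines 0).foldl locStepA (none, none)).2 = some (j : Int) := by
    rw [pv_fold_snd lines 0 (none, none), hle]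
    simp
  have hpair : ((PySem.List.enumerate lines 0).foldl locStepA (none, none))
      = (some (i : Int), some (j : Int)) := Prod.ext h1 h2
  have hb1 : PySem.List.index? (lines.map PySem.Str.strip).reverse "<Start Constraint>"
      = some (lines.length - 1 - i) := by rw [pv_index_reverse, hls, Option.map_some]
  have hb2 : PySem.List.index? (lines.map PySem.Str.strip).reverse "<End Constraint>"
      = some (lines.length - 1 - j) := by rw [pv_index_reverse, hle, Option.map_some]
  simp only [hpair, hb1, hb2]
  have e1 : ((lines.length : Int) - 1 - ((lines.length - 1 - i : Nat) : Int)) = (i : Int) := by omega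
  have e2 : ((lines.length : Int) - 1 - ((lines.length - 1 - j : Nat) : Int)) = (j : Int) := by omega
  rw [e1, e2]
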